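-- pv_equiv track=rewrite | github.com/elsalevina/Ujian_UraiRajutKata | soal1.py | urai
-- ===== SOURCE A (Python) =====
-- def urai(kata):
--     hasil = ""
--     for row in range(len(kata)):
--         for col in range(row+1):
--             hasil += kata[col]
--             hasil += ""
--     hasil += ""
--     return hasil
-- ===== SOURCE B (Python) =====
-- def urai(kata):
--     prefix = ""
--     hasil = ""
--     for ch in kata:
--         prefix += ch
--         hasil += prefix
--     return hasil
-- ===== Notes on version B (the rewrite author's own statement) =====
-- stated objective: faster
-- what changed: Replaces the nested index loops (re-reading columns 0..row for every row) by a single pass over the characters that maintains a running prefix accumulator and appends it to the result.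
import Mathlib
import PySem

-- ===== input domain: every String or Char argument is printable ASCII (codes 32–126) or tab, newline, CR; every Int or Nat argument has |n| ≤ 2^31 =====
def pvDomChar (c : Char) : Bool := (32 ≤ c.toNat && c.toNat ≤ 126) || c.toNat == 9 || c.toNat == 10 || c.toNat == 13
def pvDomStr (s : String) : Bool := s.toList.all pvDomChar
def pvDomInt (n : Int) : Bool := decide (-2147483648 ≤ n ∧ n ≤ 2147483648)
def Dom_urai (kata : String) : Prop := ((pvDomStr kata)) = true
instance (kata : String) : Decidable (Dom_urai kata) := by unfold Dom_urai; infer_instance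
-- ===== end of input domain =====

-- B replaces A's nested index loops by one pass keeping a running prefix accumulator (objective: faster, constant factor).

-- ===== PORT A =====
-- literal port of A: for row in range(len(kata)): for col in range(row+1): hasil += kata[col]
def urai (kata : String) : String :=
  let cs := kata.toList
  let hasil : List Char :=
    (PySem.List.pyRange 0 (cs.length : Int) 1).foldl
      (fun hasil row =>
        (PySem.List.pyRange 0 (row + 1) 1).foldl
          (fun h col =>
            match PySem.List.pyGet? cs col with
            | some c => h ++ [c]
            | none => h)  -- pyGet? = none is Python's IndexError; unreachable here since 0 ≤ col ≤ row < len
          hasil)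
      []
  String.ofList hasil

-- ===== PORT B =====
-- literal port of Source B: one pass, state (prefix, hasil)
def urai_alt (kata : String) : String :=
  let r := kata.toList.foldl
    (fun (st : List Char × List Char) ch => (st.1 ++ [ch], st.2 ++ (st.1 ++ [ch])))
    ([], [])
  String.ofList r.2

-- ===== PRECONDITION & SPEC =====
def Spec_urai (kata : String) (out : String) : Prop := out = urai_alt kata
instance (kata : String) (out : String) : Decidable (Spec_urai kata out) := by unfold Spec_urai; infer_instance

-- ===== CLAIM (what is proved, stated in full; the proofs are below) =====
def Claim_equal_urai : Prop := ∀ (kata : String), Dom_urai kata → Spec_urai kata (urai kata)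

-- ===== LEMMAS AND PROOFS =====

-- reference: concatenation of the successive nonempty prefixes of l, each extended with p in front
def pvPref (p : List Char) : List Char → List Char
  | [] => []
  | c :: t => (p ++ [c]) ++ pvPref (p ++ [c]) t

theorem pvB_loop (l : List Char) : ∀ (p h : List Char),
    l.foldl (fun (st : List Char × List Char) ch => (st.1 ++ [ch], st.2 ++ (st.1 ++ [ch]))) (p, h)
      = (p ++ l, h ++ pvPref p l) := by
  induction l with
  | nil => intro p h; simp [pvPref]
  | cons c t ih =>
      intro p h
      simp only [List.foldl_cons, ih, pvPref, List.append_assoc]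
      simp

theorem pvPref_eq_takes (cs : List Char) : ∀ (p : List Char),
    pvPref p cs = ((List.range cs.length).map (fun i => p ++ cs.take (i + 1))).flatten := by
  induction cs with
  | nil => intro p; simp [pvPref]
  | cons c t ih =>
      intro p
      simp only [pvPref, ih, List.length_cons, List.range_succ_eq_map, List.map_cons,
        List.map_map, List.flatten_cons]
      have h : ((fun i => p ++ List.take (i + 1) (c :: t)) ∘ Nat.succ)
          = (fun i => p ++ [c] ++ List.take (i + 1) t) := funext fun i => by
        simp [Function.comp]
      rw [h]
      simp

theorem pvA_inner (cs : List Char) : ∀ (m : Nat), m ≤ cs.length → ∀ (acc : List Char),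
    (PySem.List.pyRange 0 (m : Int) 1).foldl
      (fun h col =>
        match PySem.List.pyGet? cs col with
        | some c => h ++ [c]
        | none => h) acc = acc ++ cs.take m := by
  intro m
  induction m with
  | zero => intro _ acc; simp [PySem.List.pyRange_one_eq_nil]
  | succ n ih =>
      intro hn acc
      have hsplit : PySem.List.pyRange 0 ((n + 1 : Nat) : Int) 1
          = PySem.List.pyRange 0 (n : Int) 1 ++ [(n : Int)] := by
        push_cast
        exact PySem.List.pyRange_one_succ_right (by positivity)
      rw [hsplit, List.foldl_append, ih (by omega)]
      have hget : PySem.List.pyGet? cs (n : Int) = some cs[n] :=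
        PySem.List.pyGet?_ofNat cs n (by omega)
      simp only [List.foldl_cons, List.foldl_nil, hget, List.append_assoc]
      congr 1
      rw [List.take_add_one, List.getElem?_eq_getElem (show n < cs.length by omega)]
      simp

theorem pvA_outer (cs : List Char) : ∀ (n : Nat), n ≤ cs.length → ∀ (acc : List Char),
    (PySem.List.pyRange 0 (n : Int) 1).foldl
      (fun hasil row =>
        (PySem.List.pyRange 0 (row + 1) 1).foldl
          (fun h col =>
            match PySem.List.pyGet? cs col with
            | some c => h ++ [c]
            | none => h)
          hasil) acc
      = acc ++ ((List.range n).map (fun i => cs.take (i + 1))).flatten := by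
  intro n
  induction n with
  | zero => intro _ acc; simp [PySem.List.pyRange_one_eq_nil]
  | succ k ih =>
      intro hk acc
      have hsplit : PySem.List.pyRange 0 ((k + 1 : Nat) : Int) 1
          = PySem.List.pyRange 0 (k : Int) 1 ++ [(k : Int)] := by
        push_cast
        exact PySem.List.pyRange_one_succ_right (by positivity)
      rw [hsplit, List.foldl_append, ih (by omega)]
      have hinner := pvA_inner cs (k + 1) (by omega)
      simp only [List.foldl_cons, List.foldl_nil]
      rw [show ((k : Int) + 1) = ((k + 1 : Nat) : Int) by push_cast; ring, hinner]
      simp [List.range_succ]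

-- ===== VERDICT (by name: the statement is the Claim_ definition above) =====
theorem urai_spec : Claim_equal_urai := by
  intro kata _
  unfold Spec_urai urai urai_alt
  simp only [pvB_loop kata.toList [] []]
  rw [pvA_outer kata.toList kata.toList.length le_rfl []]
  rw [pvPref_eq_takes kata.toList []]
  simp
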